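-- pv_equiv track=rewrite | github.com/JordanSamhi/JuCify | scripts/main.py | select_abi_dir
-- ===== SOURCE A (Python) =====
-- ABI_DIRS = ['lib/armeabi-v7a/', 'lib/armeabi/', 'lib/arm64-v8a/', 'lib/x86/', 'lib/x86_64/']
--
-- def select_abi_dir(dir_list):
--     selected = None
--     abis = set()
--     for n in dir_list:
--         if n.startswith('lib/'):
--             abis.add(n.split('/')[1])
--     for abi_dir in ABI_DIRS:
--         abi = abi_dir.split('/')[1]
--         if abi in abis:
--             selected = abi_dir
--             break
--     return selected
-- ===== SOURCE B (Python) =====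
-- ABI_DIRS = ['lib/armeabi-v7a/', 'lib/armeabi/', 'lib/arm64-v8a/', 'lib/x86/', 'lib/x86_64/']
--
-- _RANK = {d.split('/')[1]: i for i, d in enumerate(ABI_DIRS)}
--
-- def select_abi_dir(dir_list):
--     best = None
--     for n in dir_list:
--         if n.startswith('lib/'):
--             r = _RANK.get(n.split('/')[1])
--             if r is not None and (best is None or r < best):
--                 best = r
--     return ABI_DIRS[best] if best is not None else None
-- ===== Notes on version B (the rewrite author's own statement) =====
-- stated objective: alternative
-- what changed: Replaces A's two-phase 'collect ABI names into a set, then scan the preference list for the first present one' with a single pass over dir_list that keeps the minimum preference rank via a precomputed name-to-rank dict, indexing ABI_DIRS by that rank at the end.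
import Mathlib
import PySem

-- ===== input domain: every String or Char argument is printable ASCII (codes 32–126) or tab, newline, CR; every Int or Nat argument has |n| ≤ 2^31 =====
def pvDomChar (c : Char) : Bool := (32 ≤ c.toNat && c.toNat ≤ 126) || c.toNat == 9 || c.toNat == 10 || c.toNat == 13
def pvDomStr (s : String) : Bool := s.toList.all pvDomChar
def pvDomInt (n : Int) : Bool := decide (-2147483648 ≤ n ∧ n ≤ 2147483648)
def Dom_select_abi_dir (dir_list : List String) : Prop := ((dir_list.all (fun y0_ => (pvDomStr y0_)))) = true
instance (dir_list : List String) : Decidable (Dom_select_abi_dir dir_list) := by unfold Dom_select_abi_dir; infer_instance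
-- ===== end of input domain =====

-- ===== PORT A =====
-- B: single pass keeping the minimum preference rank (via a precomputed name->rank dict) instead of A's
-- build-a-set-of-ABIs then scan-the-preference-list; same return value everywhere (alternative structure, no speed claim).
def ABI_DIRS : List String := ["lib/armeabi-v7a/", "lib/armeabi/", "lib/arm64-v8a/", "lib/x86/", "lib/x86_64/"]

-- n.split('/')[1] — exact here: every use is on a string containing '/' (under the startswith('lib/') guard
-- or on the ABI_DIRS literals), so split? is some and index 1 exists
def abiOf (n : String) : String := ((PySem.Str.split? n "/").getD []).getD 1 ""

-- body of A's first loop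
def stepA (s : PySem.Set String) (n : String) : PySem.Set String :=
  if PySem.Str.startswith n "lib/" then PySem.Set.add s (abiOf n) else s

-- A's second loop: selected = None; break on the first preferred ABI present
def selectLoopA (abis : PySem.Set String) : List String → Option String
  | [] => none
  | d :: rest => if PySem.Set.contains abis (abiOf d) then some d else selectLoopA abis rest

def select_abi_dir (dir_list : List String) : Option String :=
  let abis := dir_list.foldl stepA PySem.Set.empty
  selectLoopA abis ABI_DIRS

-- ===== PORT B =====
-- _RANK = {d.split('/')[1]: i for i, d in enumerate(ABI_DIRS)}
def RANK : PySem.Dict String Int :=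
  (PySem.List.enumerate ABI_DIRS 0).foldl (fun d p => PySem.Dict.insert d (abiOf p.2) p.1) PySem.Dict.empty

-- body of B's single loop: keep the smallest rank seen
def stepB (best : Option Int) (n : String) : Option Int :=
  if PySem.Str.startswith n "lib/" then
    match PySem.Dict.get? RANK (abiOf n) with
    | some r =>
      match best with
      | none => some r
      | some b => if r < b then some r else some b
    | none => best
  else best

def select_abi_dir_alt (dir_list : List String) : Option String :=
  let best := dir_list.foldl stepB none
  match best with
  | some r => PySem.List.pyGet? ABI_DIRS r
  | none => none

-- ===== PRECONDITION & SPEC =====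
def Spec_select_abi_dir (dir_list : List String) (out : Option String) : Prop := out = select_abi_dir_alt dir_list
instance (dir_list : List String) (out : Option String) : Decidable (Spec_select_abi_dir dir_list out) := by unfold Spec_select_abi_dir; infer_instance

-- ===== CLAIM (what is proved, stated in full; the proofs are below) =====
def Claim_equal_select_abi_dir : Prop := ∀ (dir_list : List String), Dom_select_abi_dir dir_list → Spec_select_abi_dir dir_list (select_abi_dir dir_list)

-- ===== LEMMAS AND PROOFS =====
def nm : Nat → String
  | 0 => "armeabi-v7a"
  | 1 => "armeabi"
  | 2 => "arm64-v8a"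
  | 3 => "x86"
  | _ => "x86_64"

-- joint invariant: B's running best is the least preference rank whose ABI name is in A's set
def AbInv (S : PySem.Set String) (b : Option Int) : Prop :=
  match b with
  | none => ∀ i < 5, nm i ∉ S
  | some r => 0 ≤ r ∧ r.toNat < 5 ∧ nm r.toNat ∈ S ∧ ∀ i < r.toNat, nm i ∉ S

lemma nm_inj : ∀ i < 5, ∀ j < 5, nm i = nm j → i = j := by decide

lemma rank_get (a : String) : PySem.Dict.get? RANK a =
    if a = nm 0 then some 0 else if a = nm 1 then some 1 else if a = nm 2 then some 2
    else if a = nm 3 then some 3 else if a = nm 4 then some 4 else none := by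
  have h : RANK = ((((PySem.Dict.empty.insert (nm 0) 0).insert (nm 1) 1).insert (nm 2) 2).insert (nm 3) 3).insert (nm 4) 4 := by decide
  rw [h]
  simp only [PySem.Dict.get?_insert, PySem.Dict.get?_empty]
  by_cases h0 : a = nm 0 <;> by_cases h1 : a = nm 1 <;> by_cases h2 : a = nm 2 <;>
    by_cases h3 : a = nm 3 <;> by_cases h4 : a = nm 4 <;>
    simp_all [nm]

lemma inv_hit_none (S : PySem.Set String) (j : Nat) (hj : j < 5) (h : AbInv S none) :
    AbInv (PySem.Set.add S (nm j)) (some (j : Int)) := by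
  simp only [AbInv] at h ⊢
  refine ⟨by positivity, by simpa using hj, ?_, ?_⟩
  · rw [PySem.Set.mem_add]; exact Or.inr rfl
  · intro i hi
    rw [PySem.Set.mem_add]
    push Not
    have hi5 : i < 5 := by omega
    have hij : i ≠ j := by omega
    exact ⟨h i hi5, fun he => hij (nm_inj i hi5 j hj he)⟩

lemma inv_hit_some (S : PySem.Set String) (j : Nat) (br : Int) (hj : j < 5) (h : AbInv S (some br)) :
    AbInv (PySem.Set.add S (nm j)) (if (j : Int) < br then some (j : Int) else some br) := by
  obtain ⟨hbr0, hbr5, hmem, hlt⟩ := h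
  split_ifs with hc
  · refine ⟨by positivity, by simpa using hj, ?_, ?_⟩
    · rw [PySem.Set.mem_add]; exact Or.inr rfl
    · intro i hi
      rw [PySem.Set.mem_add]
      push Not
      have hij : (i : Nat) < j := by simpa using hi
      have hibr : i < br.toNat := by omega
      exact ⟨hlt i hibr, fun he => (by omega : i ≠ j) (nm_inj i (by omega) j hj he)⟩
  · refine ⟨hbr0, hbr5, ?_, ?_⟩
    · rw [PySem.Set.mem_add]; exact Or.inl hmem
    · intro i hi
      rw [PySem.Set.mem_add]
      push Not
      have hij : i ≠ j := by omega
      exact ⟨hlt i hi, fun he => hij (nm_inj i (by omega) j hj he)⟩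

lemma inv_miss (S : PySem.Set String) (b : Option Int) (a : String) (ha : ∀ i < 5, nm i ≠ a)
    (h : AbInv S b) : AbInv (PySem.Set.add S a) b := by
  cases b with
  | none =>
    intro i hi
    rw [PySem.Set.mem_add]
    push Not
    exact ⟨h i hi, ha i hi⟩
  | some r =>
    obtain ⟨hr0, hr5, hmem, hlt⟩ := h
    refine ⟨hr0, hr5, ?_, ?_⟩
    · rw [PySem.Set.mem_add]; exact Or.inl hmem
    · intro i hi
      rw [PySem.Set.mem_add]
      push Not
      exact ⟨hlt i hi, ha i (by omega)⟩

lemma inv_step (S : PySem.Set String) (b : Option Int) (n : String) (h : AbInv S b) :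
    AbInv (stepA S n) (stepB b n) := by
  unfold stepA stepB
  by_cases hg : PySem.Str.startswith n "lib/" = true
  · simp only [hg, if_true]
    rw [rank_get (abiOf n)]
    by_cases h0 : abiOf n = nm 0
    · rw [if_pos h0, h0]
      cases b with
      | none => exact inv_hit_none S 0 (by norm_num) h
      | some br => exact inv_hit_some S 0 br (by norm_num) h
    · rw [if_neg h0]
      by_cases h1 : abiOf n = nm 1
      · rw [if_pos h1, h1]
        cases b with
        | none => exact inv_hit_none S 1 (by norm_num) h
        | some br => exact inv_hit_some S 1 br (by norm_num) h
      · rw [if_neg h1]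
        by_cases h2 : abiOf n = nm 2
        · rw [if_pos h2, h2]
          cases b with
          | none => exact inv_hit_none S 2 (by norm_num) h
          | some br => exact inv_hit_some S 2 br (by norm_num) h
        · rw [if_neg h2]
          by_cases h3 : abiOf n = nm 3
          · rw [if_pos h3, h3]
            cases b with
            | none => exact inv_hit_none S 3 (by norm_num) h
            | some br => exact inv_hit_some S 3 br (by norm_num) h
          · rw [if_neg h3]
            by_cases h4 : abiOf n = nm 4
            · rw [if_pos h4, h4]
              cases b with
              | none => exact inv_hit_none S 4 (by norm_num) h
              | some br => exact inv_hit_some S 4 br (by norm_num) h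
            · rw [if_neg h4]
              refine inv_miss S b (abiOf n) ?_ h
              intro i hi
              interval_cases i <;> intro he <;> simp_all
  · rw [if_neg hg, if_neg hg]
    exact h

lemma inv_foldl (l : List String) (S : PySem.Set String) (b : Option Int) (h : AbInv S b) :
    AbInv (l.foldl stepA S) (l.foldl stepB b) := by
  induction l generalizing S b with
  | nil => exact h
  | cons x xs ih => exact ih _ _ (inv_step S b x h)

lemma abi_lits : abiOf "lib/armeabi-v7a/" = nm 0 ∧ abiOf "lib/armeabi/" = nm 1 ∧
    abiOf "lib/arm64-v8a/" = nm 2 ∧ abiOf "lib/x86/" = nm 3 ∧ abiOf "lib/x86_64/" = nm 4 := by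
  decide

lemma loop_none (S : PySem.Set String) (h : AbInv S none) : selectLoopA S ABI_DIRS = none := by
  obtain ⟨e0, e1, e2, e3, e4⟩ := abi_lits
  simp only [AbInv] at h
  simp only [ABI_DIRS, selectLoopA, e0, e1, e2, e3, e4]
  rw [if_neg (by simpa [pysem] using h 0 (by norm_num)),
      if_neg (by simpa [pysem] using h 1 (by norm_num)),
      if_neg (by simpa [pysem] using h 2 (by norm_num)),
      if_neg (by simpa [pysem] using h 3 (by norm_num)),
      if_neg (by simpa [pysem] using h 4 (by norm_num))]

lemma loop_some (S : PySem.Set String) (r : Int) (h : AbInv S (some r)) :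
    selectLoopA S ABI_DIRS = PySem.List.pyGet? ABI_DIRS r := by
  obtain ⟨e0, e1, e2, e3, e4⟩ := abi_lits
  obtain ⟨hr0, hr5, hmem, hlt⟩ := h
  have hr : r = (r.toNat : Int) := (Int.toNat_of_nonneg hr0).symm
  rw [hr]
  set j := r.toNat with hjdef
  clear hr
  clear_value j
  simp only [ABI_DIRS, selectLoopA, e0, e1, e2, e3, e4]
  interval_cases j
  · rw [if_pos (by simpa [pysem] using hmem)]
    decide
  · rw [if_neg (by simpa [pysem] using hlt 0 (by norm_num)),
        if_pos (by simpa [pysem] using hmem)]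
    decide
  · rw [if_neg (by simpa [pysem] using hlt 0 (by norm_num)),
        if_neg (by simpa [pysem] using hlt 1 (by norm_num)),
        if_pos (by simpa [pysem] using hmem)]
    decide
  · rw [if_neg (by simpa [pysem] using hlt 0 (by norm_num)),
        if_neg (by simpa [pysem] using hlt 1 (by norm_num)),
        if_neg (by simpa [pysem] using hlt 2 (by norm_num)),
        if_pos (by simpa [pysem] using hmem)]
    decide
  · rw [if_neg (by simpa [pysem] using hlt 0 (by norm_num)),
        if_neg (by simpa [pysem] using hlt 1 (by norm_num)),
        if_neg (by simpa [pysem] using hlt 2 (by norm_num)),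
        if_neg (by simpa [pysem] using hlt 3 (by norm_num)),
        if_pos (by simpa [pysem] using hmem)]
    decide

-- ===== VERDICT (by name: the statement is the Claim_ definition above) =====
theorem select_abi_dir_spec : Claim_equal_select_abi_dir := by
  intro dir_list _
  unfold Spec_select_abi_dir select_abi_dir select_abi_dir_alt
  have hbase : AbInv PySem.Set.empty none := by
    intro i hi
    simp [PySem.Set.empty]
  have hinv := inv_foldl dir_list PySem.Set.empty none hbase
  show selectLoopA (dir_list.foldl stepA PySem.Set.empty) ABI_DIRS =
    match dir_list.foldl stepB none with
    | some r => PySem.List.pyGet? ABI_DIRS r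
    | none => none
  cases hb : dir_list.foldl stepB none with
  | none =>
    rw [hb] at hinv
    exact loop_none _ hinv
  | some r =>
    rw [hb] at hinv
    exact loop_some _ r hinv
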